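-- pv_equiv track=rewrite | github.com/zirui-HIT/HAO-Hospital-All-in-One | utils/check_main_symptom/check.py | validate_diagnoses
-- ===== SOURCE A (Python) =====
-- from typing import Dict, List, Set, Tuple
--
-- SymptomDB = Dict[str, Dict[str, bool]]
--
-- DiseaseDB = Dict[str, List[str]]
--
-- def validate_diagnoses(diseases: DiseaseDB, symptoms: SymptomDB) -> List[str]:
--     """
--     根据规则验证疾病的主症状配置。
--     （此函数无需修改）
--     """
--     errors: List[str] = []
--     used_main_symptoms: Dict[str, str] = {}  # 存储已用主症状及其所属疾病ID
--
--     for disease_id, associated_symptoms in diseases.items():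
--         main_symptoms_found = []
--         for symptom_id in associated_symptoms:
--             if symptom_id not in symptoms:
--                 errors.append(
--                     f"数据完整性错误: 疾病 '{disease_id}' 引用了未定义的症状 '{symptom_id}'。")
--                 continue
--
--             if symptoms[symptom_id].get('is_main', False):
--                 main_symptoms_found.append(symptom_id)
--
--         # 条件一：检查每个疾病的主症状数量
--         if len(main_symptoms_found) == 0:
--             errors.append(
--                 f"规则1错误: 疾病 '{disease_id}' 没有找到任何主要症状 (<IsMainSymptom>为true)。")
--         elif len(main_symptoms_found) > 1:
--             errors.append(
--                 f"规则1错误: 疾病 '{disease_id}' 有 {len(main_symptoms_found)} 个主要症状: {', '.join(main_symptoms_found)}。应有且仅有一个。")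
--         else:
--             # 条件二：检查主症状是否在不同疾病间重复
--             main_symptom = main_symptoms_found[0]
--             if main_symptom in used_main_symptoms:
--                 original_disease = used_main_symptoms[main_symptom]
--                 errors.append(
--                     f"规则2错误: 主要症状 '{main_symptom}' 在疾病 '{disease_id}' 和 '{original_disease}' 之间重复使用。")
--             else:
--                 used_main_symptoms[main_symptom] = disease_id
--
--     return errors
-- ===== SOURCE B (Python) =====
-- def validate_diagnoses(diseases, symptoms):
--     # Different algorithm: no running "used" dict during emission. Precompute the set of
--     # main symptoms once, tag each disease with its ordered main-symptom list, and build an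
--     # inverted first-occurrence index (main symptom -> (position, disease id) of the FIRST
--     # disease whose single main symptom it is). The emission pass is then stateless: a
--     # disease with single main m is a rule-2 duplicate iff it is not the indexed first one.
--     main_set = {s for s, attrs in symptoms.items() if attrs.get('is_main', False)}
--     tagged = [(did, assoc, [s for s in assoc if s in main_set])
--               for did, assoc in diseases.items()]
--     first_single = {}
--     for i, (did, _assoc, ms) in enumerate(tagged):
--         if len(ms) == 1 and ms[0] not in first_single:
--             first_single[ms[0]] = (i, did)
--     errors = []
--     for i, (did, assoc, ms) in enumerate(tagged):
--         errors += [f"数据完整性错误: 疾病 '{did}' 引用了未定义的症状 '{s}'。"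
--                    for s in assoc if s not in symptoms]
--         if not ms:
--             errors.append(f"规则1错误: 疾病 '{did}' 没有找到任何主要症状 (<IsMainSymptom>为true)。")
--         elif len(ms) > 1:
--             errors.append(f"规则1错误: 疾病 '{did}' 有 {len(ms)} 个主要症状: {', '.join(ms)}。应有且仅有一个。")
--         else:
--             j, orig = first_single[ms[0]]
--             if j != i:
--                 errors.append(f"规则2错误: 主要症状 '{ms[0]}' 在疾病 '{did}' 和 '{orig}' 之间重复使用。")
--     return errors
-- ===== Notes on version B (the rewrite author's own statement) =====
-- stated objective: alternative
-- what changed: A detects cross-disease duplicate main symptoms with a running used-dict mutated while errors are emitted; B instead precomputes the set of main symptoms, tags each disease with its main-symptom list, builds an inverted first-occurrence index (main symptom -> (position, disease) of the first single-main disease), and then emits all errors in one stateless pass that decides rule 2 by comparing positions against that index.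
import Mathlib
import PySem

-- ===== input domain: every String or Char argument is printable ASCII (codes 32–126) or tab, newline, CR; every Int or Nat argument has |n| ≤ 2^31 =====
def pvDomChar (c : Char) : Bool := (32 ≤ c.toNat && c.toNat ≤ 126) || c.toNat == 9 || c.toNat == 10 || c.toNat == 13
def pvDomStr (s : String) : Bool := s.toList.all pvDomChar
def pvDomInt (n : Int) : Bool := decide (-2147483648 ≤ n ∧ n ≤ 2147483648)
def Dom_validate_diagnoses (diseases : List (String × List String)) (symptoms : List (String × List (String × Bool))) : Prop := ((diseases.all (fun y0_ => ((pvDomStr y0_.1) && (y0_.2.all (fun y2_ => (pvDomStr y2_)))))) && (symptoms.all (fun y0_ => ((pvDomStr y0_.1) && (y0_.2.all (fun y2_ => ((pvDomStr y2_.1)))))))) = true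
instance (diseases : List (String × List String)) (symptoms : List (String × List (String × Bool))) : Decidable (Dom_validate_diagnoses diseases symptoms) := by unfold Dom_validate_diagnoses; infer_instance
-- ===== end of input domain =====

-- B replaces A's running used-dict with a precomputed main-symptom set, per-disease main tags,
-- and an inverted first-occurrence index, emitting errors in a stateless pass (objective: alternative).


-- ===== PORT A =====
-- shared error-message builders (identical f-strings in both Pythons)
def errUndef (did sid : String) : String :=
  "数据完整性错误: 疾病 '" ++ did ++ "' 引用了未定义的症状 '" ++ sid ++ "'。"
def err1none (did : String) : String :=
  "规则1错误: 疾病 '" ++ did ++ "' 没有找到任何主要症状 (<IsMainSymptom>为true)。"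
def err1many (did : String) (mains : List String) : String :=
  "规则1错误: 疾病 '" ++ did ++ "' 有 " ++ PySem.Int.toStr (mains.length : Int) ++ " 个主要症状: " ++ PySem.Str.join ", " mains ++ "。应有且仅有一个。"
def err2 (m did orig : String) : String :=
  "规则2错误: 主要症状 '" ++ m ++ "' 在疾病 '" ++ did ++ "' 和 '" ++ orig ++ "' 之间重复使用。"

-- A's inner loop body over associated_symptoms; state = (errors, main_symptoms_found)
def vdStepSymA (symptoms : List (String × List (String × Bool))) (disease_id : String)
    (st2 : List String × List String) (sid : String) : List String × List String :=
  match symptoms.find? (fun p => p.1 == sid) with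
  | none => (st2.1 ++ [errUndef disease_id sid], st2.2)
  | some sp =>
      if ((sp.2.find? (fun q => q.1 == "is_main")).map Prod.snd).getD false then
        (st2.1, st2.2 ++ [sid])
      else st2

-- A's outer loop body over diseases; state = (errors, used_main_symptoms)
def vdStepDisA (symptoms : List (String × List (String × Bool)))
    (st : List String × PySem.Dict String String) (dx : String × List String) :
    List String × PySem.Dict String String :=
  let inner := dx.2.foldl (vdStepSymA symptoms dx.1) (st.1, [])
  if inner.2.length = 0 then (inner.1 ++ [err1none dx.1], st.2)
  else if inner.2.length > 1 then (inner.1 ++ [err1many dx.1 inner.2], st.2)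
  else
    match st.2.get? inner.2.headI with
    | some orig => (inner.1 ++ [err2 inner.2.headI dx.1 orig], st.2)
    | none => (inner.1, st.2.insert inner.2.headI dx.1)

def validate_diagnoses (diseases : List (String × List String)) (symptoms : List (String × List (String × Bool))) : List String :=
  (diseases.foldl (vdStepDisA symptoms) ([], PySem.Dict.empty)).1

-- ===== PORT B =====
-- Source B: main_set = {s for s, attrs in symptoms.items() if attrs.get('is_main', False)}
def vdMainSet (symptoms : List (String × List (String × Bool))) : PySem.Set String :=
  PySem.Set.ofList ((symptoms.filter
    (fun p => ((p.2.find? (fun q => q.1 == "is_main")).map Prod.snd).getD false)).map Prod.fst)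

-- Source B first_single loop body: record (position, disease id) of a single-main disease, first use only
def vdFsStep (d : PySem.Dict String (Int × String))
    (x : Int × String × List String × List String) : PySem.Dict String (Int × String) :=
  match x.2.2.2 with
  | [m] => if d.contains m then d else d.insert m (x.1, x.2.1)
  | _ => d

-- Source B emission loop body: stateless, rule 2 decided against the precomputed first_single index
def vdEmit (symptoms : List (String × List (String × Bool))) (fs : PySem.Dict String (Int × String))
    (errs : List String) (x : Int × String × List String × List String) : List String :=
  let did := x.2.1
  let errs := errs ++ (x.2.2.1.filter (fun s => (symptoms.find? (fun p => p.1 == s)).isNone)).map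
      (fun s => errUndef did s)
  match x.2.2.2 with
  | [] => errs ++ [err1none did]
  | [m] =>
      match fs.get? m with
      | some jo => if jo.1 ≠ x.1 then errs ++ [err2 m did jo.2] else errs
      | none => errs  -- unreachable: every single-main disease is recorded in first_single
  | ms => errs ++ [err1many did ms]

def validate_diagnoses_alt (diseases : List (String × List String)) (symptoms : List (String × List (String × Bool))) : List String :=
  let mset := vdMainSet symptoms
  let tagged := diseases.map (fun dx => (dx.1, dx.2, dx.2.filter (fun s => PySem.Set.contains mset s)))
  let enum := PySem.List.enumerate tagged
  let fs := enum.foldl vdFsStep PySem.Dict.empty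
  enum.foldl (vdEmit symptoms fs) []

-- ===== PRECONDITION & SPEC =====
-- Pre_ excludes association lists whose symptom keys repeat: such inputs cannot arise from the
-- Python dict parameter 'symptoms' at all (dict keys are unique), so no input A returns on is excluded.
def Pre_validate_diagnoses (diseases : List (String × List String)) (symptoms : List (String × List (String × Bool))) : Prop :=
  (symptoms.map Prod.fst).Nodup
instance (diseases : List (String × List String)) (symptoms : List (String × List (String × Bool))) : Decidable (Pre_validate_diagnoses diseases symptoms) := by unfold Pre_validate_diagnoses; infer_instance

def pvWitness_validate_diagnoses : (List (String × List String)) × (List (String × List (String × Bool))) :=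
  ([("d1", ["s1", "s3"]), ("d2", ["s2"])],
   [("s1", [("is_main", true)]), ("s2", [("is_main", false)])])

def Spec_validate_diagnoses (diseases : List (String × List String)) (symptoms : List (String × List (String × Bool))) (out : List String) : Prop := out = validate_diagnoses_alt diseases symptoms
instance (diseases : List (String × List String)) (symptoms : List (String × List (String × Bool))) (out : List String) : Decidable (Spec_validate_diagnoses diseases symptoms out) := by unfold Spec_validate_diagnoses; infer_instance

-- ===== CLAIM (what is proved, stated in full; the proofs are below) =====
def Claim_equal_validate_diagnoses : Prop := ∀ (diseases : List (String × List String)) (symptoms : List (String × List (String × Bool))), Dom_validate_diagnoses diseases symptoms → Pre_validate_diagnoses diseases symptoms → Spec_validate_diagnoses diseases symptoms (validate_diagnoses diseases symptoms)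

-- ===== LEMMAS AND PROOFS =====

-- how A classifies one symptom id as main: first matching entry of the association list
def vdIsMainA (symptoms : List (String × List (String × Bool))) (s : String) : Bool :=
  match symptoms.find? (fun p => p.1 == s) with
  | none => false
  | some sp => ((sp.2.find? (fun q => q.1 == "is_main")).map Prod.snd).getD false

lemma mem_mainSet_iff (symptoms : List (String × List (String × Bool)))
    (h : (symptoms.map Prod.fst).Nodup) (s : String) :
    s ∈ vdMainSet symptoms ↔ vdIsMainA symptoms s = true := by
  unfold vdMainSet
  rw [PySem.Set.mem_ofList]
  induction symptoms with
  | nil => simp [vdIsMainA]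
  | cons p rest ih =>
    simp only [List.map_cons, List.nodup_cons] at h
    by_cases hs : p.1 = s
    · subst hs
      unfold vdIsMainA
      rw [List.find?_cons_of_pos (by simp)]
      simp only [List.filter_cons]
      by_cases hm : (((p.2.find? (fun q => q.1 == "is_main")).map Prod.snd).getD false) = true
      · simp [hm]
      · rw [if_neg (by simp [hm])]
        refine ⟨fun hmem => ?_, fun hb => absurd hb hm⟩
        obtain ⟨q, hq, hq1⟩ := List.mem_map.mp hmem
        exact absurd (hq1 ▸ List.mem_map_of_mem (List.mem_filter.mp hq).1) h.1
    · unfold vdIsMainA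
      rw [List.find?_cons_of_neg (by simp [hs])]
      have hrec := ih h.2
      unfold vdIsMainA at hrec
      simp only [List.filter_cons]
      by_cases hm : (((p.2.find? (fun q => q.1 == "is_main")).map Prod.snd).getD false) = true
      · rw [if_pos (by simp [hm])]
        simp only [List.map_cons, List.mem_cons]
        rw [← hrec]
        simp [Ne.symm hs]
      · rw [if_neg (by simp [hm])]
        exact hrec

-- under unique keys, membership in B's precomputed set is A's per-id classification
lemma contains_mainSet (symptoms : List (String × List (String × Bool)))
    (h : (symptoms.map Prod.fst).Nodup) (s : String) :
    PySem.Set.contains (vdMainSet symptoms) s = vdIsMainA symptoms s := by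
  have hm := mem_mainSet_iff symptoms h s
  simp only [PySem.Set.contains_eq_listContains, List.contains_eq_mem]
  cases hv : vdIsMainA symptoms s
  · simp only [hv] at hm; simp [hm]
  · simp only [hv, iff_true] at hm; simp [hm]

-- A's inner loop, characterised: undefined-symptom errors appended in order, mains filtered
lemma vd_inner_char (symptoms : List (String × List (String × Bool))) (did : String) :
    ∀ (assoc : List String) (errs ms : List String),
    assoc.foldl (vdStepSymA symptoms did) (errs, ms)
      = (errs ++ (assoc.filter (fun s => (symptoms.find? (fun p => p.1 == s)).isNone)).map (fun s => errUndef did s),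
         ms ++ assoc.filter (fun s => vdIsMainA symptoms s)) := by
  intro assoc
  induction assoc with
  | nil => intro errs ms; simp
  | cons sid rest ih =>
    intro errs ms
    simp only [List.foldl_cons, List.filter_cons]
    cases h : symptoms.find? (fun p => p.1 == sid) with
    | none => simp [vdStepSymA, vdIsMainA, h, ih]
    | some sp =>
      by_cases hm : (((sp.2.find? (fun q => q.1 == "is_main")).map Prod.snd).getD false) = true
      · simp [vdStepSymA, vdIsMainA, h, hm, ih]
      · simp [vdStepSymA, vdIsMainA, h, hm, ih]

-- A's outer step, rephrased on a tagged record (disease id, assoc, precomputed main list)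
def vdTagStepA (symptoms : List (String × List (String × Bool)))
    (st : List String × PySem.Dict String String) (t : String × List String × List String) :
    List String × PySem.Dict String String :=
  let errs := st.1 ++ (t.2.1.filter (fun s => (symptoms.find? (fun p => p.1 == s)).isNone)).map
      (fun s => errUndef t.1 s)
  match t.2.2 with
  | [] => (errs ++ [err1none t.1], st.2)
  | [m] =>
      match st.2.get? m with
      | some orig => (errs ++ [err2 m t.1 orig], st.2)
      | none => (errs, st.2.insert m t.1)
  | ms => (errs ++ [err1many t.1 ms], st.2)

lemma vdStepDisA_eq_tag (symptoms : List (String × List (String × Bool)))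
    (h : (symptoms.map Prod.fst).Nodup)
    (st : List String × PySem.Dict String String) (dx : String × List String) :
    vdStepDisA symptoms st dx
      = vdTagStepA symptoms st
          (dx.1, dx.2, dx.2.filter (fun s => PySem.Set.contains (vdMainSet symptoms) s)) := by
  have hfilt : dx.2.filter (fun s => PySem.Set.contains (vdMainSet symptoms) s)
      = dx.2.filter (fun s => vdIsMainA symptoms s) :=
    List.filter_congr (fun s _ => contains_mainSet symptoms h s)
  unfold vdStepDisA vdTagStepA
  rw [vd_inner_char, hfilt]
  rcases hms : dx.2.filter (fun s => vdIsMainA symptoms s) with _ | ⟨m, _ | ⟨m2, msr⟩⟩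
  · simp
  · cases (st.2.get? m) <;> simp
  · simp

-- first_single only records a key once: an existing entry survives the rest of the build fold
lemma vdFs_mono : ∀ (l : List (Int × String × List String × List String))
    (u : PySem.Dict String (Int × String)) (m : String) (p : Int × String),
    u.get? m = some p → (l.foldl vdFsStep u).get? m = some p := by
  intro l
  induction l with
  | nil => intro u m p hp; simpa using hp
  | cons x rest ih =>
    intro u m p hp
    simp only [List.foldl_cons]
    apply ih
    unfold vdFsStep
    rcases x.2.2.2 with _ | ⟨m', _ | _⟩
    · exact hp
    · by_cases hc : u.contains m' = true
      · simp [hc, hp]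
      · have hc' : u.contains m' = false := by simpa using hc
        simp only [hc', Bool.false_eq_true, if_false]
        rw [PySem.Dict.get?_insert_of_ne]
        · exact hp
        · intro hmm
          subst hmm
          rw [PySem.Dict.contains_eq_isSome_get?, hp] at hc
          simp at hc
    · exact hp

-- the core correspondence: A's stateful pass over the tagged records equals B's stateless
-- emission pass against the full first_single index, given the running-dict invariant
lemma vd_run (symptoms : List (String × List (String × Bool)))
    (fsFull : PySem.Dict String (Int × String)) :
    ∀ (l : List (Int × String × List String × List String))
      (errs : List String) (u : PySem.Dict String (Int × String)) (usedA : PySem.Dict String String),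
      (∀ m, usedA.get? m = (u.get? m).map Prod.snd) →
      (∀ m p, u.get? m = some p → ∀ x ∈ l, p.1 ≠ x.1) →
      l.Pairwise (fun a b => a.1 ≠ b.1) →
      fsFull = l.foldl vdFsStep u →
      (l.foldl (fun st x => vdTagStepA symptoms st x.2) (errs, usedA)).1
        = l.foldl (vdEmit symptoms fsFull) errs := by
  intro l
  induction l with
  | nil => intro errs u usedA _ _ _ _; rfl
  | cons x rest ih =>
    intro errs u usedA hinv hfresh hpw hfs
    simp only [List.foldl_cons] at hfs ⊢
    have hpw' := (List.pairwise_cons.mp hpw)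
    rcases hms : x.2.2.2 with _ | ⟨m, _ | ⟨m2, msr⟩⟩
    · -- no main symptom: same error, state unchanged on both sides
      have hstep : vdFsStep u x = u := by unfold vdFsStep; rw [hms]
      rw [hstep] at hfs
      have := ih (errs ++ (x.2.2.1.filter (fun s => (symptoms.find? (fun p => p.1 == s)).isNone)).map
        (fun s => errUndef x.2.1 s) ++ [err1none x.2.1]) u usedA hinv
        (fun m p hp y hy => hfresh m p hp y (List.mem_cons_of_mem _ hy)) hpw'.2 hfs
      simpa [vdTagStepA, vdEmit, hms] using this
    · -- exactly one main symptom m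
      cases hu : u.get? m with
      | some p =>
        -- already used: A reports a duplicate against p.2; B finds p in the full index
        have hstep : vdFsStep u x = u := by
          unfold vdFsStep
          rw [hms]
          simp [PySem.Dict.contains_eq_isSome_get?, hu]
        rw [hstep] at hfs
        have hfull : fsFull.get? m = some p := hfs ▸ vdFs_mono rest u m p hu
        have hne : p.1 ≠ x.1 := hfresh m p hu x (List.mem_cons_self)
        have husd : usedA.get? m = some p.2 := by rw [hinv m, hu]; rfl
        have := ih (errs ++ (x.2.2.1.filter (fun s => (symptoms.find? (fun p => p.1 == s)).isNone)).map
          (fun s => errUndef x.2.1 s) ++ [err2 m x.2.1 p.2]) u usedA hinv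
          (fun m p hp y hy => hfresh m p hp y (List.mem_cons_of_mem _ hy)) hpw'.2 hfs
        simpa [vdTagStepA, vdEmit, hms, husd, hfull, hne] using this
      | none =>
        -- first use: A records it silently; B finds x's own position in the index, no error
        have hstep : vdFsStep u x = u.insert m (x.1, x.2.1) := by
          unfold vdFsStep
          rw [hms]
          simp [PySem.Dict.contains_eq_isSome_get?, hu]
        rw [hstep] at hfs
        have hfull : fsFull.get? m = some (x.1, x.2.1) :=
          hfs ▸ vdFs_mono rest _ m _ (PySem.Dict.get?_insert_self _ _ _)
        have husd : usedA.get? m = none := by rw [hinv m, hu]; rfl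
        have hinv' : ∀ m', (usedA.insert m x.2.1).get? m'
            = ((u.insert m (x.1, x.2.1)).get? m').map Prod.snd := by
          intro m'
          rw [PySem.Dict.get?_insert, PySem.Dict.get?_insert]
          by_cases hmm : m' = m
          · simp [hmm]
          · simp [hmm, hinv m']
        have hfresh' : ∀ m' p, (u.insert m (x.1, x.2.1)).get? m' = some p →
            ∀ y ∈ rest, p.1 ≠ y.1 := by
          intro m' p hp y hy
          rw [PySem.Dict.get?_insert] at hp
          by_cases hmm : m' = m
          · rw [if_pos hmm] at hp
            cases hp
            exact hpw'.1 y hy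
          · rw [if_neg hmm] at hp
            exact hfresh m' p hp y (List.mem_cons_of_mem _ hy)
        have := ih (errs ++ (x.2.2.1.filter (fun s => (symptoms.find? (fun p => p.1 == s)).isNone)).map
          (fun s => errUndef x.2.1 s)) (u.insert m (x.1, x.2.1)) (usedA.insert m x.2.1)
          hinv' hfresh' hpw'.2 hfs
        simpa [vdTagStepA, vdEmit, hms, husd, hfull] using this
    · -- two or more main symptoms: rule-1 error, state unchanged on both sides
      have hstep : vdFsStep u x = u := by unfold vdFsStep; rw [hms]
      rw [hstep] at hfs
      have := ih (errs ++ (x.2.2.1.filter (fun s => (symptoms.find? (fun p => p.1 == s)).isNone)).map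
        (fun s => errUndef x.2.1 s) ++ [err1many x.2.1 (m :: m2 :: msr)]) u usedA hinv
        (fun m p hp y hy => hfresh m p hp y (List.mem_cons_of_mem _ hy)) hpw'.2 hfs
      simpa [vdTagStepA, vdEmit, hms] using this

-- ===== VERDICT (by name: the statement is the Claim_ definition above) =====
theorem validate_diagnoses_spec : Claim_equal_validate_diagnoses := by
  intro diseases symptoms _ hpre
  unfold Spec_validate_diagnoses validate_diagnoses validate_diagnoses_alt
  have hstep : vdStepDisA symptoms = fun st dx => vdTagStepA symptoms st
      (dx.1, dx.2, dx.2.filter (fun s => PySem.Set.contains (vdMainSet symptoms) s)) :=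
    funext fun st => funext fun dx => vdStepDisA_eq_tag symptoms hpre st dx
  show (diseases.foldl (vdStepDisA symptoms) ([], PySem.Dict.empty)).1
      = (PySem.List.enumerate (diseases.map (fun dx => (dx.1, dx.2,
            dx.2.filter (fun s => PySem.Set.contains (vdMainSet symptoms) s))))).foldl
          (vdEmit symptoms ((PySem.List.enumerate (diseases.map (fun dx => (dx.1, dx.2,
            dx.2.filter (fun s => PySem.Set.contains (vdMainSet symptoms) s))))).foldl
              vdFsStep PySem.Dict.empty)) []
  calc (diseases.foldl (vdStepDisA symptoms) ([], PySem.Dict.empty)).1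
      = ((PySem.List.enumerate (diseases.map (fun dx => (dx.1, dx.2,
            dx.2.filter (fun s => PySem.Set.contains (vdMainSet symptoms) s))))).foldl
          (fun st x => vdTagStepA symptoms st x.2) ([], PySem.Dict.empty)).1 := by
        rw [hstep,
          ← List.foldl_map (f := fun dx : String × List String => (dx.1, dx.2,
              dx.2.filter (fun s => PySem.Set.contains (vdMainSet symptoms) s)))
            (g := vdTagStepA symptoms)]
        conv_lhs => rw [← PySem.List.map_snd_enumerate (diseases.map (fun dx => (dx.1, dx.2,
          dx.2.filter (fun s => PySem.Set.contains (vdMainSet symptoms) s)))) 0]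
        rw [List.foldl_map]
    _ = _ := vd_run symptoms _ _ [] PySem.Dict.empty PySem.Dict.empty
        (fun m => by simp [PySem.Dict.get?_empty])
        (fun m p hp => by simp [PySem.Dict.get?_empty] at hp)
        ((PySem.List.pairwise_lt_enumerate _ 0).imp (fun h => ne_of_lt h))
        rfl
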